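-- pv_equiv track=rewrite | github.com/shashanknamdeo/Python | Codevita/Mockvita/MockvitaProgram2.py | count_closed_shapes
-- ===== SOURCE A (Python) =====
-- def count_closed_shapes(segments):
--     from collections import defaultdict, deque
--     #
--     adj = defaultdict(list)
--     for x1, y1, x2, y2 in segments:
--         p1 = (x1, y1)
--         p2 = (x2, y2)
--         adj[p1].append(p2)
--         adj[p2].append(p1)
--     #
--     visited = set()
--     count = 0
--     #
--     def dfs(node, parent):
--         visited.add(node)
--         for neighbor in adj[node]:
--             if neighbor not in visited:
--                 if dfs(neighbor, node):
--                     return True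
--             elif neighbor != parent:
--                 # Found a cycle
--                 return True
--         return False
--     #
--     for node in adj:
--         if node not in visited:
--             # Check if this component has a cycle
--             stack = [(node, None)]
--             has_cycle = False
--             while stack:
--                 curr, parent = stack.pop()
--                 if curr in visited:
--                     continue
--                 visited.add(curr)
--                 for neighbor in adj[curr]:
--                     if neighbor not in visited:
--                         stack.append((neighbor, curr))
--                     elif neighbor != parent:
--                         has_cycle = True
--             if has_cycle:
--                 count += 1
--     #
--     return count
-- ===== SOURCE B (Python) =====
-- def count_closed_shapes(segments):
--     # deduplicate undirected edges (reversed duplicates collapse; self-loops kept)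
--     edges = []
--     for x1, y1, x2, y2 in segments:
--         a, b = (x1, y1), (x2, y2)
--         e = (a, b) if a <= b else (b, a)
--         if e not in edges:
--             edges.append(e)
--     # grow a partition of the endpoints into connected components, one edge at a time
--     comps = []
--     for a, b in edges:
--         merged = {a, b}
--         rest = []
--         for c in comps:
--             if a in c or b in c:
--                 merged |= c
--             else:
--                 rest.append(c)
--         comps = rest + [merged]
--     # a connected component contains a cycle iff it has at least as many distinct edges as vertices
--     return sum(1 for c in comps
--                if sum(1 for a, b in edges if a in c) >= len(c))
-- ===== Notes on version B (the rewrite author's own statement) =====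
-- stated objective: alternative
-- what changed: Replaces the adjacency-list build plus explicit-stack DFS with parent-skip cycle flags by edge deduplication followed by incremental merging of endpoint components (union of touched sets per edge) and a counting criterion: a component is cyclic iff its number of distinct undirected edges is at least its number of vertices.
import Mathlib
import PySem

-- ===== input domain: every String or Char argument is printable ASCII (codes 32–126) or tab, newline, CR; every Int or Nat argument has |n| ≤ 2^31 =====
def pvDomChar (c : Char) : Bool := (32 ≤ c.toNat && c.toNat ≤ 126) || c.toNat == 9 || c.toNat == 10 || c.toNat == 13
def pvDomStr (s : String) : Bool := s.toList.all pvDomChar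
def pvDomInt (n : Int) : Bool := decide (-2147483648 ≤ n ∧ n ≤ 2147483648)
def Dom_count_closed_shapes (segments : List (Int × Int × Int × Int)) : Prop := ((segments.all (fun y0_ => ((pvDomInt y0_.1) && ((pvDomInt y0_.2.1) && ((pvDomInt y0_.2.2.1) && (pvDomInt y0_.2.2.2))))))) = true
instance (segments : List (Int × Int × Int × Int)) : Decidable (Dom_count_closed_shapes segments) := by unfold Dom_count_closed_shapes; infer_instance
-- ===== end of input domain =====

-- B replaces the stack DFS with edge dedup + component merging + an edge/vertex counting criterion (alternative algorithm, no speed claim).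

-- ===== PORT A =====
-- adjacency dict: adj[p1].append(p2); adj[p2].append(p1)  (defaultdict(list))
def pvAdj (segments : List (Int × Int × Int × Int)) :
    PySem.Dict (Int × Int) (List (Int × Int)) :=
  segments.foldl (fun adj s =>
    let p1 : Int × Int := (s.1, s.2.1)
    let p2 : Int × Int := (s.2.2.1, s.2.2.2)
    let adj := adj.insert p1 (adj.getD p1 [] ++ [p2])
    adj.insert p2 (adj.getD p2 [] ++ [p1])) PySem.Dict.empty

-- the inner 'while stack:' loop; stack top at the head (Python appends/pops at the end,
-- so the neighbour pushes appear reversed at the head).  Fuel only makes the recursion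
-- structural; with the fuel supplied below it never runs out (proved in the lemmas).
def pvLoopA (adj : PySem.Dict (Int × Int) (List (Int × Int))) :
    Nat → PySem.Set (Int × Int) → List ((Int × Int) × Option (Int × Int)) → Bool →
    PySem.Set (Int × Int) × Bool
  | 0, vis, _, flag => (vis, flag)
  | _ + 1, vis, [], flag => (vis, flag)
  | fuel + 1, vis, (c, p) :: st, flag =>
    if c ∈ vis then pvLoopA adj fuel vis st flag
    else
      let vis' := PySem.Set.add vis c
      let ns := adj.getD c []
      let pushes := (ns.filter (fun n => decide (n ∉ vis'))).map (fun n => (n, some c))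
      let trig := ns.any (fun n =>
        decide (n ∈ vis') && (match p with | none => true | some q => decide (n ≠ q)))
      pvLoopA adj fuel vis' (pushes.reverse ++ st) (flag || trig)

-- fuel bound: one pop per stack entry ever pushed; dominated by the measure proved below
def pvFuelA (adj : PySem.Dict (Int × Int) (List (Int × Int))) : Nat :=
  1 + adj.keys.length + (adj.values.map List.length).sum

def count_closed_shapes (segments : List (Int × Int × Int × Int)) : Int :=
  let adj := pvAdj segments
  let r := adj.keys.foldl (fun acc node =>
    if node ∈ acc.1 then acc
    else
      let res := pvLoopA adj (pvFuelA adj) acc.1 [(node, none)] false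
      (res.1, if res.2 then acc.2 + 1 else acc.2)) ((PySem.Set.empty : PySem.Set (Int × Int)), (0 : Int))
  r.2

-- ===== PORT B =====
-- Python tuple comparison a <= b on pairs of ints (lexicographic)
def pvLe (a b : Int × Int) : Bool := a.1 < b.1 || (a.1 == b.1 && a.2 ≤ b.2)

def pvNormEdge (a b : Int × Int) : (Int × Int) × (Int × Int) :=
  if pvLe a b then (a, b) else (b, a)

-- 'edges' list: normalized, first occurrences in order
def pvEdgesB (segments : List (Int × Int × Int × Int)) :
    List ((Int × Int) × (Int × Int)) :=
  segments.foldl (fun es s =>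
    let e := pvNormEdge (s.1, s.2.1) (s.2.2.1, s.2.2.2)
    if e ∈ es then es else es ++ [e]) []

-- one edge of the component-merging loop: absorb every touched component into 'merged'
def pvMergeStep (comps : List (PySem.Set (Int × Int)))
    (e : (Int × Int) × (Int × Int)) : List (PySem.Set (Int × Int)) :=
  let init : PySem.Set (Int × Int) :=
    PySem.Set.add (PySem.Set.add PySem.Set.empty e.1) e.2
  let mr := comps.foldl (fun (mr : PySem.Set (Int × Int) × List (PySem.Set (Int × Int))) c =>
      if e.1 ∈ c ∨ e.2 ∈ c then (PySem.Set.union mr.1 c, mr.2)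
      else (mr.1, mr.2 ++ [c])) (init, [])
  mr.2 ++ [mr.1]

def count_closed_shapes_alt (segments : List (Int × Int × Int × Int)) : Int :=
  let edges := pvEdgesB segments
  let comps := edges.foldl pvMergeStep []
  ((comps.filter (fun c => edges.countP (fun e => decide (e.1 ∈ c)) ≥ c.length)).length : Int)

-- ===== PRECONDITION & SPEC =====
def Spec_count_closed_shapes (segments : List (Int × Int × Int × Int)) (out : Int) : Prop := out = count_closed_shapes_alt segments
instance (segments : List (Int × Int × Int × Int)) (out : Int) : Decidable (Spec_count_closed_shapes segments out) := by unfold Spec_count_closed_shapes; infer_instance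

-- ===== CLAIM (what is proved, stated in full; the proofs are below) =====
def Claim_equal_count_closed_shapes : Prop := ∀ (segments : List (Int × Int × Int × Int)), Dom_count_closed_shapes segments → Spec_count_closed_shapes segments (count_closed_shapes segments)

-- ===== LEMMAS AND PROOFS =====

abbrev Pt : Type := Int × Int
abbrev Eg : Type := Pt × Pt

def pvPts (s : Int × Int × Int × Int) : Eg := ((s.1, s.2.1), (s.2.2.1, s.2.2.2))

/-- the undirected-edge relation named by a (normalized) edge list -/
def relE (E : List Eg) (u v : Pt) : Prop := pvNormEdge u v ∈ E

/-- connectivity: reflexive-transitive closure of `relE` -/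
def ConnE (E : List Eg) (u v : Pt) : Prop := Relation.ReflTransGen (relE E) u v

-- ---------- pvLe / pvNormEdge ----------

lemma pvLe_total (a b : Pt) (h : pvLe a b = false) : pvLe b a = true := by
  simp [pvLe] at h ⊢; omega

lemma pvLe_antisymm (a b : Pt) (h1 : pvLe a b = true) (h2 : pvLe b a = true) : a = b := by
  rcases a with ⟨x, y⟩; rcases b with ⟨u, v⟩
  simp [pvLe] at h1 h2
  simp only [Prod.mk.injEq]
  omega

lemma norm_comm (a b : Pt) : pvNormEdge a b = pvNormEdge b a := by
  unfold pvNormEdge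
  by_cases hab : pvLe a b = true
  · by_cases hba : pvLe b a = true
    · have := pvLe_antisymm a b hab hba; subst this; rfl
    · rw [if_pos hab, if_neg hba]
  · have hba := pvLe_total a b (by simpa using hab)
    rw [if_neg hab, if_pos hba]

lemma norm_cases (a b : Pt) : pvNormEdge a b = (a, b) ∨ pvNormEdge a b = (b, a) := by
  unfold pvNormEdge; split <;> simp

lemma norm_eq_iff {a b c d : Pt} (h : pvNormEdge a b = pvNormEdge c d) :
    (a = c ∧ b = d) ∨ (a = d ∧ b = c) := by
  rcases norm_cases a b with h1 | h1 <;> rcases norm_cases c d with h2 | h2 <;>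
    rw [h1, h2] at h <;> simp only [Prod.mk.injEq] at h <;> tauto

lemma norm_idem (a b : Pt) :
    pvNormEdge (pvNormEdge a b).1 (pvNormEdge a b).2 = pvNormEdge a b := by
  rcases norm_cases a b with h | h <;> rw [h]
  · exact h
  · rw [norm_comm]; exact h

lemma norm_endpoints {x a b : Pt} :
    (x = (pvNormEdge a b).1 ∨ x = (pvNormEdge a b).2) ↔ (x = a ∨ x = b) := by
  rcases norm_cases a b with h | h <;> rw [h] <;> simp <;> tauto

lemma relE_symm {E : List Eg} {u v : Pt} (h : relE E u v) : relE E v u := by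
  unfold relE at h ⊢; rwa [norm_comm]

lemma connE_symm {E : List Eg} {u v : Pt} (h : ConnE E u v) : ConnE E v u :=
  Relation.ReflTransGen.symmetric (fun _ _ hr => relE_symm hr) h

lemma connE_trans {E : List Eg} {u v w : Pt} (h1 : ConnE E u v) (h2 : ConnE E v w) :
    ConnE E u w := Relation.ReflTransGen.trans h1 h2

lemma connE_of_rel {E : List Eg} {u v : Pt} (h : relE E u v) : ConnE E u v :=
  Relation.ReflTransGen.single h

lemma countP_congr_mem {α : Type} (l : List α) (f g : α → Bool)
    (h : ∀ x ∈ l, f x = g x) : l.countP f = l.countP g := by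
  induction l with
  | nil => rfl
  | cons x t ih =>
    rw [List.countP_cons, List.countP_cons, h x (List.mem_cons_self ..),
      ih (fun y hy => h y (List.mem_cons_of_mem _ hy))]

lemma countP_flip_one {α : Type} [DecidableEq α] {l : List α} (hl : l.Nodup) {c : α}
    (hc : c ∈ l) (f g : α → Bool) (hsame : ∀ x ∈ l, x ≠ c → f x = g x)
    (hf : f c = false) (hg : g c = true) : l.countP g = l.countP f + 1 := by
  obtain ⟨l1, l2, rfl⟩ := List.append_of_mem hc
  have hnd := hl
  rw [List.nodup_append] at hnd
  have hc1 : c ∉ l1 := fun h => hnd.2.2 c h c (List.mem_cons_self ..) rfl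
  have hc2 : c ∉ l2 := (List.nodup_cons.mp hnd.2.1).1
  have e1 : l1.countP g = l1.countP f := countP_congr_mem _ _ _
    (fun x hx => (hsame x (by simp [hx]) (fun h => hc1 (h ▸ hx))).symm)
  have e2 : l2.countP g = l2.countP f := countP_congr_mem _ _ _
    (fun x hx => (hsame x (by simp [hx]) (fun h => hc2 (h ▸ hx))).symm)
  rw [List.countP_append, List.countP_append, List.countP_cons, List.countP_cons,
    e1, e2, hf, hg]
  simp
  omega

-- ---------- the edge list pvEdgesB ----------

lemma mem_pvEdgesB_aux (l : List (Int × Int × Int × Int)) :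
    ∀ (acc : List Eg) (e : Eg),
      e ∈ l.foldl (fun es s =>
        let e := pvNormEdge (s.1, s.2.1) (s.2.2.1, s.2.2.2)
        if e ∈ es then es else es ++ [e]) acc ↔
      e ∈ acc ∨ ∃ s ∈ l, e = pvNormEdge (pvPts s).1 (pvPts s).2 := by
  induction l with
  | nil => intro acc e; simp
  | cons s t ih =>
    intro acc e
    rw [List.foldl_cons]
    by_cases hmem : pvNormEdge (s.1, s.2.1) (s.2.2.1, s.2.2.2) ∈ acc
    · rw [if_pos hmem, ih]
      constructor
      · rintro (h | ⟨s', hs', h⟩)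
        · exact Or.inl h
        · exact Or.inr ⟨s', List.mem_cons_of_mem _ hs', h⟩
      · rintro (h | ⟨s', hs', h⟩)
        · exact Or.inl h
        · rcases List.mem_cons.mp hs' with h0 | h0
          · subst h0; exact Or.inl (by rw [h]; exact hmem)
          · exact Or.inr ⟨s', h0, h⟩
    · rw [if_neg hmem, ih]
      constructor
      · rintro (h | ⟨s', hs', h⟩)
        · rcases List.mem_append.mp h with h0 | h0
          · exact Or.inl h0
          · exact Or.inr ⟨s, List.mem_cons_self .., by simpa using h0⟩
        · exact Or.inr ⟨s', List.mem_cons_of_mem _ hs', h⟩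
      · rintro (h | ⟨s', hs', h⟩)
        · exact Or.inl (List.mem_append.mpr (Or.inl h))
        · rcases List.mem_cons.mp hs' with h0 | h0
          · subst h0
            exact Or.inl (List.mem_append.mpr (Or.inr (by simpa using h)))
          · exact Or.inr ⟨s', h0, h⟩

lemma mem_pvEdgesB (segs : List (Int × Int × Int × Int)) (e : Eg) :
    e ∈ pvEdgesB segs ↔ ∃ s ∈ segs, e = pvNormEdge (pvPts s).1 (pvPts s).2 := by
  have := mem_pvEdgesB_aux segs [] e
  simpa [pvEdgesB] using this

lemma nodup_edges_aux (l : List (Int × Int × Int × Int)) :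
    ∀ acc : List Eg, acc.Nodup →
      (l.foldl (fun es s =>
        let e := pvNormEdge (s.1, s.2.1) (s.2.2.1, s.2.2.2)
        if e ∈ es then es else es ++ [e]) acc).Nodup := by
  induction l with
  | nil => intro acc h; simpa using h
  | cons s t ih =>
    intro acc h
    rw [List.foldl_cons]
    by_cases hmem : pvNormEdge (s.1, s.2.1) (s.2.2.1, s.2.2.2) ∈ acc
    · rw [if_pos hmem]; exact ih acc h
    · rw [if_neg hmem]
      apply ih
      apply List.Nodup.append h (List.nodup_singleton _)
      intro x hx hx'
      rw [List.mem_singleton] at hx'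
      subst hx'
      exact hmem hx

lemma nodup_pvEdgesB (segs : List (Int × Int × Int × Int)) : (pvEdgesB segs).Nodup := by
  have := nodup_edges_aux segs [] List.nodup_nil
  simpa [pvEdgesB] using this

lemma pvEdgesB_normalized {segs : List (Int × Int × Int × Int)} {e : Eg}
    (h : e ∈ pvEdgesB segs) : pvNormEdge e.1 e.2 = e := by
  obtain ⟨s, _, he⟩ := (mem_pvEdgesB segs e).mp h
  subst he; exact norm_idem _ _

lemma relE_of_mem_pvEdgesB {segs : List (Int × Int × Int × Int)} {e : Eg}
    (h : e ∈ pvEdgesB segs) : relE (pvEdgesB segs) e.1 e.2 := by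
  unfold relE; rw [pvEdgesB_normalized h]; exact h

-- ---------- the adjacency dict pvAdj ----------

lemma mem_adj_getD (segs : List (Int × Int × Int × Int)) (c n : Pt) :
    n ∈ (pvAdj segs).getD c [] ↔
      ∃ s ∈ segs, pvPts s = (c, n) ∨ pvPts s = (n, c) := by
  have aux : ∀ (l : List (Int × Int × Int × Int)) (d : PySem.Dict Pt (List Pt)),
      n ∈ (l.foldl (fun adj s =>
        let p1 : Pt := (s.1, s.2.1)
        let p2 : Pt := (s.2.2.1, s.2.2.2)
        let adj := adj.insert p1 (adj.getD p1 [] ++ [p2])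
        adj.insert p2 (adj.getD p2 [] ++ [p1])) d).getD c [] ↔
      n ∈ d.getD c [] ∨ ∃ s ∈ l, pvPts s = (c, n) ∨ pvPts s = (n, c) := by
    intro l
    induction l with
    | nil => intro d; simp
    | cons s t ih =>
      intro d
      rw [List.foldl_cons, ih]
      have hstep : ∀ d : PySem.Dict Pt (List Pt),
          n ∈ ((d.insert (s.1, s.2.1) (d.getD (s.1, s.2.1) [] ++ [(s.2.2.1, s.2.2.2)])).insert
              (s.2.2.1, s.2.2.2)
              ((d.insert (s.1, s.2.1) (d.getD (s.1, s.2.1) [] ++ [(s.2.2.1, s.2.2.2)])).getD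
                (s.2.2.1, s.2.2.2) [] ++ [(s.1, s.2.1)])).getD c [] ↔
            n ∈ d.getD c [] ∨
              (((s.1, s.2.1), (s.2.2.1, s.2.2.2)) = ((c, n) : Eg) ∨
                ((s.1, s.2.1), (s.2.2.1, s.2.2.2)) = ((n, c) : Eg)) := by
        intro d
        rw [PySem.Dict.getD_insert, PySem.Dict.getD_insert, PySem.Dict.getD_insert]
        by_cases hc2 : c = (s.2.2.1, s.2.2.2) <;> by_cases hc1 : c = (s.1, s.2.1) <;>
          by_cases h21 : ((s.2.2.1, s.2.2.2) : Pt) = (s.1, s.2.1) <;>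
          simp_all [Prod.mk.injEq, eq_comm] <;> tauto
      rw [hstep d]
      simp only [pvPts, List.mem_cons]
      constructor
      · rintro ((h | h) | ⟨s', hs', h⟩)
        · exact Or.inl h
        · exact Or.inr ⟨s, Or.inl rfl, h⟩
        · exact Or.inr ⟨s', Or.inr hs', h⟩
      · rintro (h | ⟨s', hs' | hs', h⟩)
        · exact Or.inl (Or.inl h)
        · subst hs'; exact Or.inl (Or.inr h)
        · exact Or.inr ⟨s', hs', h⟩
  have := aux segs PySem.Dict.empty
  simpa [pvAdj] using this

lemma rel_iff_adj (segs : List (Int × Int × Int × Int)) (c n : Pt) :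
    relE (pvEdgesB segs) c n ↔ n ∈ (pvAdj segs).getD c [] := by
  rw [mem_adj_getD]
  unfold relE
  rw [mem_pvEdgesB]
  constructor
  · rintro ⟨s, hs, h⟩
    rcases norm_eq_iff h with ⟨h1, h2⟩ | ⟨h1, h2⟩
    · exact ⟨s, hs, Or.inl (by rcases hp : pvPts s with ⟨a, b⟩; simp [hp] at h1 h2; simp [h1, h2])⟩
    · exact ⟨s, hs, Or.inr (by rcases hp : pvPts s with ⟨a, b⟩; simp [hp] at h1 h2; simp [h1, h2])⟩
  · rintro ⟨s, hs, h | h⟩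
    · exact ⟨s, hs, by rw [h]⟩
    · exact ⟨s, hs, by rw [h]; exact norm_comm _ _⟩

lemma mem_keys_pvAdj (segs : List (Int × Int × Int × Int)) (v : Pt) :
    v ∈ (pvAdj segs).keys ↔ ∃ s ∈ segs, v = (pvPts s).1 ∨ v = (pvPts s).2 := by
  have aux : ∀ (l : List (Int × Int × Int × Int)) (d : PySem.Dict Pt (List Pt)),
      v ∈ (l.foldl (fun adj s =>
        let p1 : Pt := (s.1, s.2.1)
        let p2 : Pt := (s.2.2.1, s.2.2.2)
        let adj := adj.insert p1 (adj.getD p1 [] ++ [p2])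
        adj.insert p2 (adj.getD p2 [] ++ [p1])) d).keys ↔
      v ∈ d.keys ∨ ∃ s ∈ l, v = (pvPts s).1 ∨ v = (pvPts s).2 := by
    intro l
    induction l with
    | nil => intro d; simp
    | cons s t ih =>
      intro d
      rw [List.foldl_cons, ih]
      rw [show ∀ d' : PySem.Dict Pt (List Pt), (v ∈ ((d'.insert (s.1, s.2.1)
            (d'.getD (s.1, s.2.1) [] ++ [(s.2.2.1, s.2.2.2)])).insert (s.2.2.1, s.2.2.2)
            ((d'.insert (s.1, s.2.1) (d'.getD (s.1, s.2.1) [] ++ [(s.2.2.1, s.2.2.2)])).getD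
              (s.2.2.1, s.2.2.2) [] ++ [(s.1, s.2.1)])).keys) =
          (v = ((s.2.2.1, s.2.2.2) : Pt) ∨ v = ((s.1, s.2.1) : Pt) ∨ v ∈ d'.keys) from
        fun d' => by
          rw [eq_iff_iff, PySem.Dict.mem_keys_insert, PySem.Dict.mem_keys_insert]]
      simp only [pvPts, List.mem_cons]
      constructor
      · rintro ((h | h | h) | ⟨s', hs', h⟩)
        · exact Or.inr ⟨s, Or.inl rfl, Or.inr h⟩
        · exact Or.inr ⟨s, Or.inl rfl, Or.inl h⟩
        · exact Or.inl h
        · exact Or.inr ⟨s', Or.inr hs', h⟩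
      · rintro (h | ⟨s', hs' | hs', h⟩)
        · exact Or.inl (Or.inr (Or.inr h))
        · subst hs'; rcases h with h | h
          · exact Or.inl (Or.inr (Or.inl h))
          · exact Or.inl (Or.inl h)
        · exact Or.inr ⟨s', hs', h⟩
  have := aux segs PySem.Dict.empty
  simpa [pvAdj] using this

lemma nodup_keys_pvAdj (segs : List (Int × Int × Int × Int)) : (pvAdj segs).keys.Nodup := by
  have aux : ∀ (l : List (Int × Int × Int × Int)) (d : PySem.Dict Pt (List Pt)),
      d.keys.Nodup →
      (l.foldl (fun adj s =>
        let p1 : Pt := (s.1, s.2.1)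
        let p2 : Pt := (s.2.2.1, s.2.2.2)
        let adj := adj.insert p1 (adj.getD p1 [] ++ [p2])
        adj.insert p2 (adj.getD p2 [] ++ [p1])) d).keys.Nodup := by
    intro l
    induction l with
    | nil => intro d h; simpa using h
    | cons s t ih =>
      intro d h
      rw [List.foldl_cons]
      exact ih _ (PySem.Dict.nodup_keys_insert _ _ _ (PySem.Dict.nodup_keys_insert _ _ _ h))
  exact aux segs PySem.Dict.empty (by simp [PySem.Dict.keys, PySem.Dict.empty])

lemma rel_mem_keys {segs : List (Int × Int × Int × Int)} {u v : Pt}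
    (h : relE (pvEdgesB segs) u v) : u ∈ (pvAdj segs).keys := by
  unfold relE at h
  obtain ⟨s, hs, he⟩ := (mem_pvEdgesB segs _).mp h
  have : u = (pvNormEdge u v).1 ∨ u = (pvNormEdge u v).2 := by
    rcases norm_cases u v with h0 | h0 <;> rw [h0] <;> simp
  rw [he] at this
  have := norm_endpoints.mp this
  exact (mem_keys_pvAdj segs u).mpr ⟨s, hs, this⟩

lemma edge_fst_mem_keys {segs : List (Int × Int × Int × Int)} {e : Eg}
    (h : e ∈ pvEdgesB segs) : e.1 ∈ (pvAdj segs).keys := by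
  exact rel_mem_keys (relE_of_mem_pvEdgesB h)

-- ---------- B-side: partition invariant ----------

def touchB (e : Eg) (c : List Pt) : Bool := decide (e.1 ∈ c) || decide (e.2 ∈ c)

structure PartInv (F : List Eg) (comps : List (List Pt)) : Prop where
  nodup : ∀ c ∈ comps, List.Nodup c
  nonempty : ∀ c ∈ comps, c ≠ []
  disj : List.Pairwise (fun c d => ∀ x, x ∈ c → x ∉ d) comps
  cover : ∀ v : Pt, (∃ c ∈ comps, v ∈ c) ↔ ∃ e ∈ F, v = e.1 ∨ v = e.2
  conn : ∀ c ∈ comps, ∀ u ∈ c, ∀ v ∈ c, ConnE F u v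
  closed : ∀ c ∈ comps, ∀ u ∈ c, ∀ v, relE F u v → v ∈ c

lemma merge_foldl_char (e : Eg) :
    ∀ (comps : List (PySem.Set Pt)) (m : PySem.Set Pt) (r : List (PySem.Set Pt)),
      comps.foldl (fun (mr : PySem.Set Pt × List (PySem.Set Pt)) c =>
        if e.1 ∈ c ∨ e.2 ∈ c then (PySem.Set.union mr.1 c, mr.2)
        else (mr.1, mr.2 ++ [c])) (m, r) =
      ((comps.filter (touchB e)).foldl PySem.Set.union m,
       r ++ comps.filter (fun c => !touchB e c)) := by
  intro comps
  induction comps with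
  | nil => intro m r; simp
  | cons c t ih =>
    intro m r
    rw [List.foldl_cons]
    by_cases ht : e.1 ∈ c ∨ e.2 ∈ c
    · rw [if_pos ht, ih]
      have htb : touchB e c = true := by simp only [touchB]; rcases ht with h | h <;> simp [h]
      simp [List.filter_cons, htb]
    · rw [if_neg ht, ih]
      have htb : touchB e c = false := by
        simp only [touchB]; rw [not_or] at ht; simp [ht.1, ht.2]
      simp [List.filter_cons, htb]

lemma mem_foldl_union (l : List (PySem.Set Pt)) :
    ∀ (m : PySem.Set Pt) (x : Pt),
      x ∈ l.foldl PySem.Set.union m ↔ x ∈ m ∨ ∃ c ∈ l, x ∈ c := by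
  induction l with
  | nil => intro m x; simp
  | cons c t ih =>
    intro m x
    rw [List.foldl_cons, ih]
    rw [PySem.Set.mem_union]
    simp only [List.mem_cons]
    constructor
    · rintro ((h | h) | ⟨c', hc', h⟩)
      · exact Or.inl h
      · exact Or.inr ⟨c, Or.inl rfl, h⟩
      · exact Or.inr ⟨c', Or.inr hc', h⟩
    · rintro (h | ⟨c', hc' | hc', h⟩)
      · exact Or.inl (Or.inl h)
      · subst hc'; exact Or.inl (Or.inr h)
      · exact Or.inr ⟨c', hc', h⟩

lemma nodup_foldl_union (l : List (PySem.Set Pt)) :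
    ∀ (m : PySem.Set Pt), m.Nodup → (l.foldl PySem.Set.union m).Nodup := by
  induction l with
  | nil => intro m h; simpa using h
  | cons c t ih =>
    intro m h
    rw [List.foldl_cons]
    exact ih _ (PySem.Set.nodup_union _ _ h)

/-- two distinct members of a pairwise-disjoint list are disjoint -/
lemma disj_of_mem {comps : List (List Pt)}
    (h : List.Pairwise (fun c d => ∀ x, x ∈ c → x ∉ d) comps)
    {c d : List Pt} (hc : c ∈ comps) (hd : d ∈ comps) (hne : c ≠ d) :
    ∀ x, x ∈ c → x ∉ d := by
  have hsym : Symmetric (fun c d : List Pt => ∀ x, x ∈ c → x ∉ d) := by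
    intro c d h x hxd hxc
    exact (h x hxc) hxd
  exact List.Pairwise.forall hsym h hc hd hne

lemma mergeStep_inv {F : List Eg} {comps : List (List Pt)} (e : Eg)
    (hinv : PartInv F comps) (hnorm : pvNormEdge e.1 e.2 = e) :
    PartInv (F ++ [e]) (pvMergeStep comps e) := by
  have hchar := merge_foldl_char e comps
    (PySem.Set.add (PySem.Set.add PySem.Set.empty e.1) e.2) []
  have hgoal : pvMergeStep comps e =
      comps.filter (fun c => !touchB e c) ++
        [(comps.filter (touchB e)).foldl PySem.Set.union
          (PySem.Set.add (PySem.Set.add PySem.Set.empty e.1) e.2)] := by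
    show (List.foldl (fun (mr : PySem.Set Pt × List (PySem.Set Pt)) c =>
        if e.1 ∈ c ∨ e.2 ∈ c then (PySem.Set.union mr.1 c, mr.2)
        else (mr.1, mr.2 ++ [c])) (PySem.Set.add (PySem.Set.add PySem.Set.empty e.1) e.2, []) comps).2 ++
      [(List.foldl (fun (mr : PySem.Set Pt × List (PySem.Set Pt)) c =>
        if e.1 ∈ c ∨ e.2 ∈ c then (PySem.Set.union mr.1 c, mr.2)
        else (mr.1, mr.2 ++ [c])) (PySem.Set.add (PySem.Set.add PySem.Set.empty e.1) e.2, []) comps).1] = _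
    rw [hchar]
    simp
  rw [hgoal]
  set touched := comps.filter (touchB e) with htouched
  set untouched := comps.filter (fun c => !touchB e c) with huntouched
  set merged := touched.foldl PySem.Set.union
    (PySem.Set.add (PySem.Set.add PySem.Set.empty e.1) e.2) with hmerged
  have hsubT : ∀ c ∈ touched, c ∈ comps := fun c hc => List.mem_of_mem_filter hc
  have hsubU : ∀ c ∈ untouched, c ∈ comps := fun c hc => List.mem_of_mem_filter hc
  have hUnot : ∀ c ∈ untouched, e.1 ∉ c ∧ e.2 ∉ c := by
    intro c hc
    have := List.of_mem_filter hc
    simp only [touchB, Bool.not_eq_true', Bool.or_eq_false_iff, decide_eq_false_iff_not] at this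
    exact this
  have hTyes : ∀ c ∈ touched, e.1 ∈ c ∨ e.2 ∈ c := by
    intro c hc
    have := List.of_mem_filter hc
    simp only [touchB, Bool.or_eq_true, decide_eq_true_eq] at this
    exact this
  have hm : ∀ x, x ∈ merged ↔ (x = e.1 ∨ x = e.2) ∨ ∃ c ∈ touched, x ∈ c := by
    intro x
    rw [hmerged, mem_foldl_union]
    rw [PySem.Set.mem_add, PySem.Set.mem_add]
    simp [PySem.Set.empty]
  have hrelF' : ∀ u v, relE (F ++ [e]) u v ↔ relE F u v ∨ pvNormEdge u v = e := by
    intro u v; simp [relE]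
  have hconnMono : ∀ u v, ConnE F u v → ConnE (F ++ [e]) u v := by
    intro u v h
    exact Relation.ReflTransGen.mono (fun a b hr => by
      simp only [relE] at hr ⊢; exact List.mem_append.mpr (Or.inl hr)) h
  have hnormpair : ∀ u v, pvNormEdge u v = e → (u = e.1 ∧ v = e.2) ∨ (u = e.2 ∧ v = e.1) := by
    intro u v h
    exact norm_eq_iff (h.trans hnorm.symm)
  -- connectivity of everything in merged to e.1
  have hconnM : ∀ x ∈ merged, ConnE (F ++ [e]) e.1 x := by
    intro x hx
    have hre : relE (F ++ [e]) e.1 e.2 := by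
      simp only [relE]; rw [hnorm]; exact List.mem_append.mpr (Or.inr (by simp))
    rcases (hm x).mp hx with (h | h) | ⟨c, hc, hxc⟩
    · subst h; exact Relation.ReflTransGen.refl
    · subst h; exact Relation.ReflTransGen.single hre
    · rcases hTyes c hc with hw | hw
      · exact connE_trans (hconnMono _ _ (hinv.conn c (hsubT c hc) _ hw _ hxc)) .refl |>.mono
          (fun _ _ h => h) |> fun h => h
      · exact connE_trans (Relation.ReflTransGen.single hre)
          (hconnMono _ _ (hinv.conn c (hsubT c hc) _ hw _ hxc))
  refine ⟨?_, ?_, ?_, ?_, ?_, ?_⟩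
  · -- nodup
    intro c hc
    rcases List.mem_append.mp hc with h | h
    · exact hinv.nodup c (hsubU c h)
    · rw [List.mem_singleton] at h; subst h
      apply nodup_foldl_union
      apply PySem.Set.nodup_add
      apply PySem.Set.nodup_add
      exact List.nodup_nil
  · -- nonempty
    intro c hc
    rcases List.mem_append.mp hc with h | h
    · exact hinv.nonempty c (hsubU c h)
    · rw [List.mem_singleton] at h; subst h
      exact List.ne_nil_of_mem ((hm e.1).mpr (Or.inl (Or.inl rfl)))
  · -- pairwise disjoint
    rw [List.pairwise_append]
    refine ⟨List.Pairwise.sublist List.filter_sublist hinv.disj, List.pairwise_singleton _ _, ?_⟩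
    intro c hc d hd x hxc hxd
    rw [List.mem_singleton] at hd; subst hd
    rcases (hm x).mp hxd with (h | h) | ⟨c', hc', hxc'⟩
    · exact (hUnot c hc).1 (h ▸ hxc)
    · exact (hUnot c hc).2 (h ▸ hxc)
    · have hne : c ≠ c' := by
        intro h; subst h
        have := List.of_mem_filter hc
        have := List.of_mem_filter hc'
        simp_all
      exact disj_of_mem hinv.disj (hsubU c hc) (hsubT c' hc') hne x hxc hxc'
  · -- cover
    intro v
    constructor
    · rintro ⟨c, hc, hvc⟩
      rcases List.mem_append.mp hc with h | h
      · obtain ⟨e', he', hv⟩ := (hinv.cover v).mp ⟨c, hsubU c h, hvc⟩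
        exact ⟨e', List.mem_append.mpr (Or.inl he'), hv⟩
      · rw [List.mem_singleton] at h; subst h
        rcases (hm v).mp hvc with (h | h) | ⟨c', hc', hvc'⟩
        · exact ⟨e, by simp, Or.inl h⟩
        · exact ⟨e, by simp, Or.inr h⟩
        · obtain ⟨e', he', hv⟩ := (hinv.cover v).mp ⟨c', hsubT c' hc', hvc'⟩
          exact ⟨e', List.mem_append.mpr (Or.inl he'), hv⟩
    · rintro ⟨e', he', hv⟩
      rcases List.mem_append.mp he' with h | h
      · obtain ⟨c, hc, hvc⟩ := (hinv.cover v).mpr ⟨e', h, hv⟩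
        by_cases ht : touchB e c = true
        · exact ⟨merged, by simp, (hm v).mpr (Or.inr ⟨c, List.mem_filter.mpr ⟨hc, ht⟩, hvc⟩)⟩
        · refine ⟨c, List.mem_append.mpr (Or.inl ?_), hvc⟩
          exact List.mem_filter.mpr ⟨hc, by simp [ht]⟩
      · rw [List.mem_singleton] at h; subst h
        exact ⟨merged, by simp, (hm v).mpr (Or.inl hv)⟩
  · -- conn
    intro c hc u hu v hv
    rcases List.mem_append.mp hc with h | h
    · exact hconnMono _ _ (hinv.conn c (hsubU c h) u hu v hv)
    · rw [List.mem_singleton] at h; subst h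
      exact connE_trans (connE_symm (hconnM u hu)) (hconnM v hv)
  · -- closed
    intro c hc u hu v hrel
    rcases List.mem_append.mp hc with h | h
    · rcases (hrelF' u v).mp hrel with hr | hr
      · exact hinv.closed c (hsubU c h) u hu v hr
      · rcases hnormpair u v hr with ⟨h1, _⟩ | ⟨h1, _⟩
        · exact absurd (h1 ▸ hu) (hUnot c h).1
        · exact absurd (h1 ▸ hu) (hUnot c h).2
    · rw [List.mem_singleton] at h; subst h
      rcases (hrelF' u v).mp hrel with hr | hr
      · rcases (hm u).mp hu with (h | h) | ⟨c', hc', huc'⟩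
        · -- u = e.1, rel in F: u lies in some old comp, which is touched
          obtain ⟨c₀, hc₀, huc₀⟩ := (hinv.cover u).mpr ⟨pvNormEdge u v, hr, by
            rcases norm_cases u v with h0 | h0 <;> rw [h0] <;> simp⟩
          have : v ∈ c₀ := hinv.closed c₀ hc₀ u huc₀ v hr
          refine (hm v).mpr (Or.inr ⟨c₀, List.mem_filter.mpr ⟨hc₀, ?_⟩, this⟩)
          simp only [touchB]
          rw [← h]
          simp [huc₀]
        · obtain ⟨c₀, hc₀, huc₀⟩ := (hinv.cover u).mpr ⟨pvNormEdge u v, hr, by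
            rcases norm_cases u v with h0 | h0 <;> rw [h0] <;> simp⟩
          have : v ∈ c₀ := hinv.closed c₀ hc₀ u huc₀ v hr
          refine (hm v).mpr (Or.inr ⟨c₀, List.mem_filter.mpr ⟨hc₀, ?_⟩, this⟩)
          simp only [touchB]
          rw [← h]
          simp [huc₀]
        · have : v ∈ c' := hinv.closed c' (hsubT c' hc') u huc' v hr
          exact (hm v).mpr (Or.inr ⟨c', hc', this⟩)
      · rcases hnormpair u v hr with ⟨_, h2⟩ | ⟨_, h2⟩
        · exact (hm v).mpr (Or.inl (Or.inr h2))
        · exact (hm v).mpr (Or.inl (Or.inl h2))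

lemma partInv_full (segs : List (Int × Int × Int × Int)) :
    PartInv (pvEdgesB segs) ((pvEdgesB segs).foldl pvMergeStep []) := by
  have base : PartInv [] [] := by
    refine ⟨by simp, by simp, by simp, by simp, by simp, by simp⟩
  have fold : ∀ (l F0 : List Eg) (comps : List (List Pt)), PartInv F0 comps →
      (∀ e ∈ l, pvNormEdge e.1 e.2 = e) → PartInv (F0 ++ l) (l.foldl pvMergeStep comps) := by
    intro l
    induction l with
    | nil => intro F0 comps h _; simpa using h
    | cons e t ih =>
      intro F0 comps h hn
      rw [List.foldl_cons]
      have := ih (F0 ++ [e]) (pvMergeStep comps e)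
        (mergeStep_inv e h (hn e (List.mem_cons_self ..)))
        (fun e' he' => hn e' (List.mem_cons_of_mem _ he'))
      simpa [List.append_assoc] using this
  have := fold (pvEdgesB segs) [] [] base (fun e he => pvEdgesB_normalized he)
  simpa using this

lemma partInv_class {F : List Eg} {comps : List (List Pt)} (h : PartInv F comps)
    {c : List Pt} (hc : c ∈ comps) {u : Pt} (hu : u ∈ c) :
    ∀ v, v ∈ c ↔ ConnE F u v := by
  intro v
  constructor
  · exact fun hv => h.conn c hc u hu v hv
  · intro hconn
    induction hconn with
    | refl => exact hu
    | tail _ hr ih => exact h.closed c hc _ ih _ hr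

lemma partInv_comps_nodup {F : List Eg} {comps : List (List Pt)} (h : PartInv F comps) :
    comps.Nodup := by
  have : comps.Pairwise (· ≠ ·) := by
    apply List.Pairwise.imp_of_mem ?_ h.disj
    intro c d hc hd hcd heq
    subst heq
    obtain ⟨x, hx⟩ := List.exists_mem_of_ne_nil c (h.nonempty c hc)
    exact (hcd x hx) hx
  exact this

-- ---------- A-side: DFS loop invariant ----------

def parVerts (k : Pt) (par : List (Pt × Pt)) : List Pt := k :: par.map Prod.fst

def ParChain (E : List Eg) (k : Pt) : List (Pt × Pt) → Prop
  | [] => True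
  | (w, q) :: rest =>
      w ∉ parVerts k rest ∧ q ∈ parVerts k rest ∧ relE E q w ∧ ParChain E k rest

def parEdges (par : List (Pt × Pt)) : List Eg := par.map (fun wq => pvNormEdge wq.1 wq.2)

lemma parVerts_nodup {E : List Eg} {k : Pt} {par : List (Pt × Pt)}
    (h : ParChain E k par) : (parVerts k par).Nodup := by
  induction par with
  | nil => simp [parVerts]
  | cons wq rest ih =>
    rcases wq with ⟨w, q⟩
    obtain ⟨hw, hq, hrel, hrest⟩ := h
    have ihh := ih hrest
    simp only [parVerts, List.map_cons, List.nodup_cons, List.mem_cons] at ihh ⊢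
    simp only [parVerts, List.mem_cons] at hw
    refine ⟨?_, ⟨?_, ihh.2⟩⟩
    · rintro (h0 | h0)
      · exact hw (Or.inl h0.symm)
      · exact ihh.1 h0
    · intro h0
      exact hw (Or.inr h0)

lemma parEdges_mem_E {E : List Eg} {k : Pt} {par : List (Pt × Pt)} (h : ParChain E k par) :
    ∀ e ∈ parEdges par, e ∈ E ∧ (e.1 ∈ parVerts k par ∧ e.2 ∈ parVerts k par) := by
  induction par with
  | nil => simp [parEdges]
  | cons wq rest ih =>
    rcases wq with ⟨w, q⟩
    obtain ⟨hw, hq, hrel, hrest⟩ := h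
    intro e he
    have hsub : ∀ x, x ∈ parVerts k rest → x ∈ parVerts k ((w, q) :: rest) := by
      intro x hx
      simp only [parVerts, List.map_cons, List.mem_cons] at hx ⊢
      tauto
    rcases List.mem_cons.mp he with h0 | h0
    · subst h0
      refine ⟨?_, ?_, ?_⟩
      · show pvNormEdge w q ∈ E
        rw [norm_comm]; exact hrel
      · have : (pvNormEdge w q).1 = w ∨ (pvNormEdge w q).1 = q :=
          norm_endpoints.mp (Or.inl rfl)
        rcases this with h1 | h1 <;> rw [h1]
        · simp [parVerts]
        · exact hsub q hq
      · have : (pvNormEdge w q).2 = w ∨ (pvNormEdge w q).2 = q :=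
          norm_endpoints.mp (Or.inr rfl)
        rcases this with h1 | h1 <;> rw [h1]
        · simp [parVerts]
        · exact hsub q hq
    · obtain ⟨he1, he2, he3⟩ := ih hrest e h0
      exact ⟨he1, hsub _ he2, hsub _ he3⟩

lemma parEdges_nodup {E : List Eg} {k : Pt} {par : List (Pt × Pt)} (h : ParChain E k par) :
    (parEdges par).Nodup := by
  induction par with
  | nil => simp [parEdges]
  | cons wq rest ih =>
    rcases wq with ⟨w, q⟩
    obtain ⟨hw, hq, hrel, hrest⟩ := h
    rw [parEdges, List.map_cons, List.nodup_cons]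
    refine ⟨?_, ih hrest⟩
    intro hmem
    obtain ⟨_, hx1, hx2⟩ := parEdges_mem_E hrest _ hmem
    have : w = (pvNormEdge w q).1 ∨ w = (pvNormEdge w q).2 :=
      norm_endpoints.mpr (Or.inl rfl)
    rcases this with h1 | h1
    · exact hw (h1 ▸ hx1)
    · exact hw (h1 ▸ hx2)

lemma count_noflag {E : List Eg} {k : Pt} {par : List (Pt × Pt)} (hE : E.Nodup)
    (h : ParChain E k par)
    (hall : ∀ e ∈ E, e.1 ∈ parVerts k par → e.2 ∈ parVerts k par → e ∈ parEdges par) :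
    E.countP (fun e => decide (e.1 ∈ parVerts k par) && decide (e.2 ∈ parVerts k par)) =
      par.length := by
  rw [List.countP_eq_length_filter]
  have hperm : (E.filter
      (fun e => decide (e.1 ∈ parVerts k par) && decide (e.2 ∈ parVerts k par))).Perm
      (parEdges par) := by
    rw [List.perm_ext_iff_of_nodup (hE.filter _) (parEdges_nodup h)]
    intro e
    rw [List.mem_filter]
    constructor
    · rintro ⟨he, hp⟩
      simp only [Bool.and_eq_true, decide_eq_true_eq] at hp
      exact hall e he hp.1 hp.2
    · intro he
      obtain ⟨h1, h2, h3⟩ := parEdges_mem_E h e he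
      exact ⟨h1, by simp [h2, h3]⟩
  rw [hperm.length_eq, parEdges, List.length_map]

lemma count_flag {E : List Eg} {k : Pt} {par : List (Pt × Pt)} (hE : E.Nodup)
    (h : ParChain E k par) {e0 : Eg} (he0 : e0 ∈ E)
    (h1 : e0.1 ∈ parVerts k par) (h2 : e0.2 ∈ parVerts k par) (hne : e0 ∉ parEdges par) :
    par.length + 1 ≤
      E.countP (fun e => decide (e.1 ∈ parVerts k par) && decide (e.2 ∈ parVerts k par)) := by
  rw [List.countP_eq_length_filter]
  have hnd : (e0 :: parEdges par).Nodup := by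
    rw [List.nodup_cons]
    exact ⟨hne, parEdges_nodup h⟩
  have hsub : (e0 :: parEdges par) ⊆ E.filter
      (fun e => decide (e.1 ∈ parVerts k par) && decide (e.2 ∈ parVerts k par)) := by
    intro e he
    rcases List.mem_cons.mp he with h0 | h0
    · subst h0
      exact List.mem_filter.mpr ⟨he0, by simp [h1, h2]⟩
    · obtain ⟨ha, hb, hc⟩ := parEdges_mem_E h e h0
      exact List.mem_filter.mpr ⟨ha, by simp [hb, hc]⟩
  have := (List.subperm_of_subset hnd hsub).length_le
  simpa [parEdges, Nat.add_comm] using this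

structure LoopInv (E : List Eg) (V0 : List Pt) (k : Pt) (vis : List Pt)
    (st : List (Pt × Option Pt)) (flag : Bool) (par : List (Pt × Pt)) : Prop where
  chain : ParChain E k par
  visEq : ∃ W : List Pt, vis = V0 ++ W ∧ W.Nodup ∧ ∀ x, x ∈ W ↔ x ∈ parVerts k par
  stackOk : ∀ cp ∈ st, ∃ q : Pt, cp.2 = some q ∧ q ∈ parVerts k par ∧ relE E q cp.1
  covered : ∀ u ∈ parVerts k par, ∀ v, relE E u v → v ∈ vis ∨ v ∈ st.map Prod.fst
  inC : ∀ w ∈ parVerts k par, ConnE E k w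
  noflag : flag = false → ∀ e ∈ E, e.1 ∈ parVerts k par → e.2 ∈ parVerts k par →
    e ∈ parEdges par
  hasflag : flag = true → ∃ e ∈ E, (e.1 ∈ parVerts k par ∧ e.2 ∈ parVerts k par) ∧
    e ∉ parEdges par

-- measure for the while loop
def pvDegSum (adj : PySem.Dict Pt (List Pt)) (vis : List Pt) : Nat :=
  ((adj.keys.filter (fun v => decide (v ∉ vis))).map
    (fun v => 1 + (adj.getD v []).length)).sum

def pvMeas (adj : PySem.Dict Pt (List Pt)) (vis : List Pt)
    (st : List (Pt × Option Pt)) : Nat := st.length + pvDegSum adj vis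

lemma sum_filter_drop (g : Pt → Nat) (vis : List Pt) (c : Pt)
    (hc : c ∉ vis) :
    ∀ l : List Pt, l.Nodup → c ∈ l →
      ((l.filter (fun v => decide (v ∉ vis ++ [c]))).map g).sum + g c =
        ((l.filter (fun v => decide (v ∉ vis))).map g).sum := by
  intro l
  induction l with
  | nil => intro _ hcl; simp at hcl
  | cons x t ih =>
    intro hnd hcl
    rw [List.nodup_cons] at hnd
    rw [List.filter_cons, List.filter_cons]
    rcases List.mem_cons.mp hcl with heq | hct
    · subst heq
      have hfilt : t.filter (fun v => decide (v ∉ vis ++ [c])) =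
          t.filter (fun v => decide (v ∉ vis)) := by
        apply List.filter_congr
        intro v hv
        have hvc : v ≠ c := by rintro rfl; exact hnd.1 hv
        simp [List.mem_append, hvc]
      rw [show (decide (c ∉ vis ++ [c])) = false by simp,
        show (decide (c ∉ vis)) = true by simp [hc], hfilt]
      simp [Nat.add_comm]
    · have hxc : x ≠ c := by rintro rfl; exact hnd.1 hct
      rw [show (decide (x ∉ vis ++ [c])) = decide (x ∉ vis) by
        simp [List.mem_append, hxc]]
      have ihh := ih hnd.2 hct
      cases hdx : decide (x ∉ vis)
      · simpa [hdx] using ihh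
      · simp only [hdx, if_true, List.map_cons, List.sum_cons]
        omega

lemma degSum_drop (adj : PySem.Dict Pt (List Pt)) (vis : List Pt) (c : Pt)
    (hkey : c ∈ adj.keys) (hnodup : adj.keys.Nodup) (hc : c ∉ vis) :
    pvDegSum adj (vis ++ [c]) + (1 + (adj.getD c []).length) = pvDegSum adj vis := by
  unfold pvDegSum
  exact sum_filter_drop (fun v => 1 + (adj.getD v []).length) vis c hc adj.keys hnodup hkey

lemma sum_map_one_add {α : Type} (l : List α) (g : α → Nat) :
    (l.map (fun v => 1 + g v)).sum = l.length + (l.map g).sum := by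
  induction l with
  | nil => simp
  | cons x t ih => simp [ih]; omega

lemma degSum_le (adj : PySem.Dict Pt (List Pt)) (vis : List Pt) (hnodup : adj.keys.Nodup) :
    pvDegSum adj vis ≤ adj.keys.length + (adj.values.map List.length).sum := by
  unfold pvDegSum
  have h1 : ((adj.keys.filter (fun v => decide (v ∉ vis))).map
      (fun v => 1 + (adj.getD v []).length)).sum ≤
      (adj.keys.map (fun v => 1 + (adj.getD v []).length)).sum := by
    apply List.Sublist.sum_le_sum
    · exact (List.filter_sublist).map _
    · intro x _; omega
  have h2 : (adj.keys.map (fun v => 1 + (adj.getD v []).length)).sum =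
      adj.keys.length + (adj.values.map List.length).sum := by
    rw [sum_map_one_add]
    have hv := PySem.Dict.values_eq_map_keys adj hnodup ([] : List Pt)
    rw [hv, List.map_map]
    rfl
  omega

lemma fuel_ok (adj : PySem.Dict Pt (List Pt)) (vis : List Pt) (k : Pt)
    (hnodup : adj.keys.Nodup) : pvMeas adj vis [(k, none)] ≤ pvFuelA adj := by
  have := degSum_le adj vis hnodup
  simp only [pvMeas, pvFuelA, List.length_singleton]
  omega

lemma loop_run (segs : List (Int × Int × Int × Int)) (V0 : List Pt) (k : Pt)
    (hV0 : ∀ v, ConnE (pvEdgesB segs) k v → v ∉ V0) :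
    ∀ (fuel : Nat) (vis : List Pt) (st : List (Pt × Option Pt)) (flag : Bool)
      (par : List (Pt × Pt)),
      LoopInv (pvEdgesB segs) V0 k vis st flag par →
      pvMeas (pvAdj segs) vis st ≤ fuel →
      ∃ par', LoopInv (pvEdgesB segs) V0 k
        (pvLoopA (pvAdj segs) fuel vis st flag).1 []
        (pvLoopA (pvAdj segs) fuel vis st flag).2 par' := by
  intro fuel
  induction fuel with
  | zero =>
    intro vis st flag par hinv hm
    cases st with
    | nil => exact ⟨par, hinv⟩
    | cons hd tl => simp [pvMeas] at hm
  | succ fuel ih =>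
    intro vis st flag par hinv hm
    cases st with
    | nil => exact ⟨par, hinv⟩
    | cons cp st' =>
      obtain ⟨c, p⟩ := cp
      by_cases hcv : c ∈ vis
      · -- pop of an already-visited node
        simp only [pvLoopA]
        rw [if_pos hcv]
        refine ih vis st' flag par
          ⟨hinv.chain, hinv.visEq, ?_, ?_, hinv.inC, hinv.noflag, hinv.hasflag⟩ ?_
        · intro cp hcp; exact hinv.stackOk cp (List.mem_cons_of_mem _ hcp)
        · intro u hu v hr
          rcases hinv.covered u hu v hr with h | h
          · exact Or.inl h
          · rw [List.map_cons] at h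
            rcases List.mem_cons.mp h with h0 | h0
            · exact Or.inl (h0 ▸ hcv)
            · exact Or.inr h0
        · simp only [pvMeas, List.length_cons] at hm ⊢; omega
      · -- fresh pop: visit c
        obtain ⟨q, hpq, hqmem, hqrel⟩ := hinv.stackOk (c, p) (List.mem_cons_self ..)
        simp only at hpq
        subst hpq
        simp only [pvLoopA]
        rw [if_neg hcv]
        obtain ⟨W, hvis, hWnd, hWmem⟩ := hinv.visEq
        have hEnorm : ∀ e ∈ pvEdgesB segs, pvNormEdge e.1 e.2 = e :=
          fun e he => pvEdgesB_normalized he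
        have hcC : ConnE (pvEdgesB segs) k c :=
          connE_trans (hinv.inC q hqmem) (connE_of_rel hqrel)
        have hcV0 : c ∉ V0 := hV0 c hcC
        have hcW : c ∉ W := fun h => hcv (by rw [hvis]; exact List.mem_append.mpr (Or.inr h))
        have hcPV : c ∉ parVerts k par := fun h => hcW ((hWmem c).mpr h)
        have hcq : c ≠ q := fun h => hcPV (h ▸ hqmem)
        have hvis' : PySem.Set.add vis c = vis ++ [c] := PySem.Set.add_of_not_mem hcv
        have hchain' : ParChain (pvEdgesB segs) k ((c, q) :: par) :=
          ⟨hcPV, hqmem, hqrel, hinv.chain⟩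
        have hmemPV' : ∀ x, x ∈ parVerts k ((c, q) :: par) ↔ x ∈ parVerts k par ∨ x = c := by
          intro x
          simp only [parVerts, List.map_cons, List.mem_cons]
          tauto
        have hPVvis : ∀ x, x ∈ parVerts k par → x ∈ vis := by
          intro x hx
          rw [hvis]
          exact List.mem_append.mpr (Or.inr ((hWmem x).mpr hx))
        have hPV'vis' : ∀ x, x ∈ parVerts k ((c, q) :: par) → x ∈ PySem.Set.add vis c := by
          intro x hx
          rw [hvis']
          rcases (hmemPV' x).mp hx with h | h
          · exact List.mem_append.mpr (Or.inl (hPVvis x h))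
          · exact List.mem_append.mpr (Or.inr (by simp [h]))
        have hrelc : ∀ n, relE (pvEdgesB segs) c n ↔ n ∈ (pvAdj segs).getD c [] :=
          fun n => rel_iff_adj segs c n
        -- the new invariant
        have hinv' : LoopInv (pvEdgesB segs) V0 k (PySem.Set.add vis c)
            (((((pvAdj segs).getD c []).filter
                (fun n => decide (n ∉ PySem.Set.add vis c))).map
              (fun n => (n, some c))).reverse ++ st')
            (flag || ((pvAdj segs).getD c []).any
              (fun n => decide (n ∈ PySem.Set.add vis c) && decide (n ≠ q)))
            ((c, q) :: par) := by
          have hPE : parEdges ((c, q) :: par) = pvNormEdge c q :: parEdges par := rfl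
          have hcvis'' : c ∈ PySem.Set.add vis c := by rw [hvis']; simp
          refine ⟨hchain', ?_, ?_, ?_, ?_, ?_, ?_⟩
          · -- visEq
            refine ⟨W ++ [c], ?_, ?_, ?_⟩
            · rw [hvis', hvis, List.append_assoc]
            · refine List.Nodup.append hWnd (List.nodup_singleton _) ?_
              intro x hx hx'
              rw [List.mem_singleton] at hx'
              subst hx'
              exact hcW hx
            · intro x
              rw [List.mem_append, List.mem_singleton, hmemPV' x, hWmem x]
          · -- stackOk
            intro cp hcp
            rcases List.mem_append.mp hcp with h | h
            · rw [List.mem_reverse] at h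
              obtain ⟨n, hn, rfl⟩ := List.mem_map.mp h
              exact ⟨c, rfl, (hmemPV' c).mpr (Or.inr rfl),
                (hrelc n).mpr (List.mem_filter.mp hn).1⟩
            · obtain ⟨q', hq', hmem', hrel'⟩ := hinv.stackOk cp (List.mem_cons_of_mem _ h)
              exact ⟨q', hq', (hmemPV' q').mpr (Or.inl hmem'), hrel'⟩
          · -- covered
            intro u hu v hr
            rcases (hmemPV' u).mp hu with h | h
            · rcases hinv.covered u h v hr with hv | hv
              · exact Or.inl (by rw [hvis']; exact List.mem_append.mpr (Or.inl hv))
              · rw [List.map_cons] at hv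
                rcases List.mem_cons.mp hv with h0 | h0
                · exact Or.inl (h0 ▸ hcvis'')
                · right
                  rw [List.map_append, List.mem_append]
                  exact Or.inr h0
            · subst h
              have hvns : v ∈ (pvAdj segs).getD u [] := (hrelc v).mp hr
              by_cases hv : v ∈ PySem.Set.add vis u
              · exact Or.inl hv
              · right
                rw [List.map_append, List.mem_append]
                left
                rw [List.map_reverse, List.mem_reverse]
                exact List.mem_map.mpr ⟨(v, some u),
                  List.mem_map.mpr ⟨v, List.mem_filter.mpr ⟨hvns, by simpa using hv⟩, rfl⟩, rfl⟩
          · -- inC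
            intro w hw
            rcases (hmemPV' w).mp hw with h | h
            · exact hinv.inC w h
            · exact h ▸ hcC
          · -- noflag
            intro hfl
            rw [Bool.or_eq_false_iff] at hfl
            have htrigF : ∀ n ∈ (pvAdj segs).getD c [], n ∈ PySem.Set.add vis c → n = q := by
              intro n hn hnv
              by_contra hne
              have : (((pvAdj segs).getD c []).any
                  (fun n => decide (n ∈ PySem.Set.add vis c) && decide (n ≠ q))) = true :=
                List.any_eq_true.mpr ⟨n, hn, by simp [hnv, hne]⟩
              rw [this] at hfl
              simp at hfl
            intro e he h1 h2
            have hnorme := hEnorm e he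
            rcases (hmemPV' e.1).mp h1 with h1' | h1' <;> rcases (hmemPV' e.2).mp h2 with h2' | h2'
            · rw [hPE]
              exact List.mem_cons_of_mem _ (hinv.noflag hfl.1 e he h1' h2')
            · -- e.2 = c, e.1 ∈ old parVerts
              have hrel1 : relE (pvEdgesB segs) c e.1 := by
                show pvNormEdge c e.1 ∈ pvEdgesB segs
                rw [norm_comm, ← h2', hnorme]
                exact he
              have hns1 : e.1 ∈ (pvAdj segs).getD c [] := (hrelc e.1).mp hrel1
              have hvis1 : e.1 ∈ PySem.Set.add vis c := by
                rw [hvis']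
                exact List.mem_append.mpr (Or.inl (hPVvis _ h1'))
              have heq : e.1 = q := htrigF _ hns1 hvis1
              rw [hPE]
              exact List.mem_cons.mpr (Or.inl (by rw [norm_comm, ← heq, ← h2', hnorme]))
            · -- e.1 = c, e.2 ∈ old parVerts
              have hrel2 : relE (pvEdgesB segs) c e.2 := by
                show pvNormEdge c e.2 ∈ pvEdgesB segs
                rw [← h1', hnorme]
                exact he
              have hns2 : e.2 ∈ (pvAdj segs).getD c [] := (hrelc e.2).mp hrel2
              have hvis2 : e.2 ∈ PySem.Set.add vis c := by
                rw [hvis']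
                exact List.mem_append.mpr (Or.inl (hPVvis _ h2'))
              have heq : e.2 = q := htrigF _ hns2 hvis2
              rw [hPE]
              exact List.mem_cons.mpr (Or.inl (by rw [← h1', ← heq, hnorme]))
            · -- e.1 = c and e.2 = c : self-loop triggers
              exfalso
              have hrelcc : relE (pvEdgesB segs) c c := by
                show pvNormEdge c c ∈ pvEdgesB segs
                have hce : pvNormEdge c c = e := by rw [← hnorme, h1', h2']
                rw [hce]; exact he
              have := htrigF c ((hrelc c).mp hrelcc) hcvis''
              exact hcq this
          · -- hasflag
            intro hfl
            cases hflagc : flag with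
            | true =>
              obtain ⟨e0, he0, ⟨hA, hB⟩, hC⟩ := hinv.hasflag hflagc
              refine ⟨e0, he0, ⟨(hmemPV' _).mpr (Or.inl hA), (hmemPV' _).mpr (Or.inl hB)⟩, ?_⟩
              rw [hPE]
              intro hmem'
              rcases List.mem_cons.mp hmem' with h0 | h0
              · have hce : c = e0.1 ∨ c = e0.2 := by
                  rw [h0]
                  exact norm_endpoints.mpr (Or.inl rfl)
                rcases hce with h1 | h1
                · exact hcPV (h1 ▸ hA)
                · exact hcPV (h1 ▸ hB)
              · exact hC h0
            | false =>
              subst hflagc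
              rw [Bool.false_or] at hfl
              obtain ⟨n, hn, hcond⟩ := List.any_eq_true.mp hfl
              rw [Bool.and_eq_true, decide_eq_true_eq, decide_eq_true_eq] at hcond
              have hreln : relE (pvEdgesB segs) c n := (hrelc n).mpr hn
              have hnPV' : n ∈ parVerts k ((c, q) :: par) := by
                have hnC : ConnE (pvEdgesB segs) k n := connE_trans hcC (connE_of_rel hreln)
                have hnV0 : n ∉ V0 := hV0 n hnC
                have : n ∈ vis ++ [c] := by rw [← hvis']; exact hcond.1
                rcases List.mem_append.mp this with h0 | h0
                · rw [hvis] at h0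
                  rcases List.mem_append.mp h0 with h1 | h1
                  · exact absurd h1 hnV0
                  · exact (hmemPV' n).mpr (Or.inl ((hWmem n).mp h1))
                · rw [List.mem_singleton] at h0
                  exact (hmemPV' n).mpr (Or.inr h0)
              refine ⟨pvNormEdge c n, hreln, ⟨?_, ?_⟩, ?_⟩
              · rcases norm_endpoints.mp (Or.inl (rfl : (pvNormEdge c n).1 = (pvNormEdge c n).1)) with h0 | h0
                · rw [h0]; exact (hmemPV' c).mpr (Or.inr rfl)
                · rw [h0]; exact hnPV'
              · rcases norm_endpoints.mp (Or.inr (rfl : (pvNormEdge c n).2 = (pvNormEdge c n).2)) with h0 | h0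
                · rw [h0]; exact (hmemPV' c).mpr (Or.inr rfl)
                · rw [h0]; exact hnPV'
              · rw [hPE]
                intro hmem'
                rcases List.mem_cons.mp hmem' with h0 | h0
                · rcases norm_eq_iff h0 with ⟨_, h2⟩ | ⟨h1, _⟩
                  · exact hcond.2 h2
                  · exact hcq h1
                · obtain ⟨_, hx1, hx2⟩ := parEdges_mem_E hinv.chain _ h0
                  have hce : c = (pvNormEdge c n).1 ∨ c = (pvNormEdge c n).2 :=
                    norm_endpoints.mpr (Or.inl rfl)
                  rcases hce with h1 | h1
                  · exact hcPV (h1 ▸ hx1)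
                  · exact hcPV (h1 ▸ hx2)
        refine ih _ _ _ _ hinv' ?_
        · -- measure decreases
          have hckey : c ∈ (pvAdj segs).keys := rel_mem_keys (relE_symm hqrel)
          have hdrop := degSum_drop (pvAdj segs) vis c hckey (nodup_keys_pvAdj segs) hcv
          rw [← hvis'] at hdrop
          show pvMeas (pvAdj segs) (PySem.Set.add vis c)
            (((((pvAdj segs).getD c []).filter
                (fun n => decide (n ∉ PySem.Set.add vis c))).map
              (fun n => (n, some c))).reverse ++ st') ≤ fuel
          simp only [pvMeas, List.length_cons, List.length_append,
            List.length_reverse, List.length_map] at hm ⊢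
          have hlf : (((pvAdj segs).getD c []).filter
              (fun n => decide (n ∉ PySem.Set.add vis c))).length ≤
              ((pvAdj segs).getD c []).length := List.length_filter_le _ _
          omega
      

lemma loop_component (segs : List (Int × Int × Int × Int)) (k : Pt) (vis0 : List Pt)
    (hk : k ∈ (pvAdj segs).keys) (hkvis : k ∉ vis0)
    (hV0 : ∀ v, ConnE (pvEdgesB segs) k v → v ∉ vis0) :
    ∃ (W : List Pt) (flag : Bool),
      pvLoopA (pvAdj segs) (pvFuelA (pvAdj segs)) vis0 [(k, none)] false = (vis0 ++ W, flag) ∧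
      W.Nodup ∧ (∀ x, x ∈ W ↔ ConnE (pvEdgesB segs) k x) ∧
      (flag = true ↔ W.length ≤
        (pvEdgesB segs).countP (fun e => decide (e.1 ∈ W) && decide (e.2 ∈ W))) := by
  have hEnorm : ∀ e ∈ pvEdgesB segs, pvNormEdge e.1 e.2 = e :=
    fun e he => pvEdgesB_normalized he
  have hnk := nodup_keys_pvAdj segs
  have hrelk : ∀ n, relE (pvEdgesB segs) k n ↔ n ∈ (pvAdj segs).getD k [] :=
    fun n => rel_iff_adj segs k n
  have hvis1 : PySem.Set.add vis0 k = vis0 ++ [k] := PySem.Set.add_of_not_mem hkvis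
  obtain ⟨f, hF⟩ : ∃ f, pvFuelA (pvAdj segs) = f + 1 := by
    have : 1 ≤ pvFuelA (pvAdj segs) := by simp [pvFuelA]; omega
    exact ⟨pvFuelA (pvAdj segs) - 1, by omega⟩
  have hmeas0 := fuel_ok (pvAdj segs) vis0 k hnk
  rw [hF]
  simp only [pvLoopA]
  rw [if_neg hkvis]
  -- the state after visiting k
  have hinv1 : LoopInv (pvEdgesB segs) vis0 k (PySem.Set.add vis0 k)
      (((((pvAdj segs).getD k []).filter
          (fun n => decide (n ∉ PySem.Set.add vis0 k))).map
        (fun n => (n, some k))).reverse ++ [])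
      (false || ((pvAdj segs).getD k []).any
        (fun n => decide (n ∈ PySem.Set.add vis0 k) && true))
      [] := by
    have hkPV : ∀ x, x ∈ parVerts k ([] : List (Pt × Pt)) ↔ x = k := by
      intro x; simp [parVerts]
    have hkvis'' : k ∈ PySem.Set.add vis0 k := by rw [hvis1]; simp
    refine ⟨trivial, ⟨[k], ?_, List.nodup_singleton _, ?_⟩, ?_, ?_, ?_, ?_, ?_⟩
    · rw [hvis1]
    · intro x; rw [List.mem_singleton, hkPV x]
    · intro cp hcp
      rw [List.append_nil, List.mem_reverse] at hcp
      obtain ⟨n, hn, rfl⟩ := List.mem_map.mp hcp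
      exact ⟨k, rfl, (hkPV k).mpr rfl, (hrelk n).mpr (List.mem_filter.mp hn).1⟩
    · intro u hu v hr
      rw [hkPV u] at hu
      subst hu
      have hvns : v ∈ (pvAdj segs).getD u [] := (hrelk v).mp hr
      by_cases hv : v ∈ PySem.Set.add vis0 u
      · exact Or.inl hv
      · right
        rw [List.append_nil, List.map_reverse, List.mem_reverse]
        exact List.mem_map.mpr ⟨(v, some u),
          List.mem_map.mpr ⟨v, List.mem_filter.mpr ⟨hvns, by simpa using hv⟩, rfl⟩, rfl⟩
    · intro w hw
      rw [hkPV w] at hw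
      subst hw
      exact Relation.ReflTransGen.refl
    · intro hfl
      rw [Bool.false_or] at hfl
      intro e he h1 h2
      rw [hkPV e.1] at h1
      rw [hkPV e.2] at h2
      exfalso
      have hrelkk : relE (pvEdgesB segs) k k := by
        show pvNormEdge k k ∈ pvEdgesB segs
        have : pvNormEdge k k = e := by rw [← hEnorm e he, h1, h2]
        rw [this]; exact he
      have : (((pvAdj segs).getD k []).any
          (fun n => decide (n ∈ PySem.Set.add vis0 k) && true)) = true :=
        List.any_eq_true.mpr ⟨k, (hrelk k).mp hrelkk, by simp [hkvis'']⟩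
      rw [this] at hfl
      simp at hfl
    · intro hfl
      rw [Bool.false_or] at hfl
      obtain ⟨n, hn, hcond⟩ := List.any_eq_true.mp hfl
      rw [Bool.and_eq_true, decide_eq_true_eq] at hcond
      have hreln : relE (pvEdgesB segs) k n := (hrelk n).mpr hn
      have hnk' : n = k := by
        have hnC : ConnE (pvEdgesB segs) k n := connE_of_rel hreln
        have hnV0 : n ∉ vis0 := hV0 n hnC
        have : n ∈ vis0 ++ [k] := by rw [← hvis1]; exact hcond.1
        rcases List.mem_append.mp this with h0 | h0
        · exact absurd h0 hnV0
        · exact List.mem_singleton.mp h0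
      subst hnk'
      refine ⟨pvNormEdge n n, hreln, ⟨?_, ?_⟩, by simp [parEdges]⟩
      · rcases norm_cases n n with h0 | h0 <;> rw [h0] <;> exact (hkPV n).mpr rfl
      · rcases norm_cases n n with h0 | h0 <;> rw [h0] <;> exact (hkPV n).mpr rfl
  have hmeas1 : pvMeas (pvAdj segs)
      (PySem.Set.add vis0 k)
      (((((pvAdj segs).getD k []).filter
          (fun n => decide (n ∉ PySem.Set.add vis0 k))).map
        (fun n => (n, some k))).reverse ++ []) ≤ f := by
    have hdrop := degSum_drop (pvAdj segs) vis0 k hk hnk hkvis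
    rw [← hvis1] at hdrop
    rw [hF] at hmeas0
    simp only [pvMeas, List.length_singleton] at hmeas0
    simp only [pvMeas, List.length_append, List.length_reverse, List.length_map,
      List.length_nil]
    have hlf : (((pvAdj segs).getD k []).filter
        (fun n => decide (n ∉ PySem.Set.add vis0 k))).length ≤
        ((pvAdj segs).getD k []).length := List.length_filter_le _ _
    omega
  obtain ⟨par', hfin⟩ := loop_run segs vis0 k hV0 f _ _ _ _ hinv1 hmeas1
  obtain ⟨W', hveq, hWnd', hWmem'⟩ := hfin.visEq
  have hWPV : ∀ x, x ∈ W' ↔ x ∈ parVerts k par' := hWmem'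
  have hWconn : ∀ x, x ∈ W' ↔ ConnE (pvEdgesB segs) k x := by
    intro x
    constructor
    · intro hx
      exact hfin.inC x ((hWPV x).mp hx)
    · intro hconn
      induction hconn with
      | refl => exact (hWPV k).mpr (by simp [parVerts])
      | tail hc hr ihc =>
        rcases hfin.covered _ ((hWPV _).mp ihc) _ hr with h0 | h0
        · rw [hveq] at h0
          rcases List.mem_append.mp h0 with h1 | h1
          · exact absurd h1 (hV0 _ (Relation.ReflTransGen.tail hc hr))
          · exact h1
        · simp at h0
  have hlenW : W'.length = par'.length + 1 := by
    have hperm : W'.Perm (parVerts k par') :=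
      (List.perm_ext_iff_of_nodup hWnd' (parVerts_nodup hfin.chain)).mpr hWmem'
    rw [hperm.length_eq]
    simp [parVerts]
  have hcntEq : (pvEdgesB segs).countP
      (fun e => decide (e.1 ∈ W') && decide (e.2 ∈ W')) =
      (pvEdgesB segs).countP
      (fun e => decide (e.1 ∈ parVerts k par') && decide (e.2 ∈ parVerts k par')) := by
    apply countP_congr_mem
    intro e _
    rw [decide_eq_decide.mpr (hWmem' e.1), decide_eq_decide.mpr (hWmem' e.2)]
  obtain ⟨vfin, ffin, hR⟩ : ∃ v fl, pvLoopA (pvAdj segs) f (PySem.Set.add vis0 k)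
      (((((pvAdj segs).getD k []).filter
          (fun n => decide (n ∉ PySem.Set.add vis0 k))).map
        (fun n => (n, some k))).reverse ++ [])
      (false || ((pvAdj segs).getD k []).any
        (fun n => decide (n ∈ PySem.Set.add vis0 k) && true)) = (v, fl) := ⟨_, _, rfl⟩
  have hveq' : vfin = vis0 ++ W' := by rw [hR] at hveq; exact hveq
  have hproj : (pvLoopA (pvAdj segs) f (PySem.Set.add vis0 k)
      (((((pvAdj segs).getD k []).filter
          (fun n => decide (n ∉ PySem.Set.add vis0 k))).map
        (fun n => (n, some k))).reverse ++ [])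
      (false || ((pvAdj segs).getD k []).any
        (fun n => decide (n ∈ PySem.Set.add vis0 k) && true))).2 = ffin := by rw [hR]
  refine ⟨W', ffin, ?_, hWnd', hWconn, ?_⟩
  · exact hR.trans (by rw [hveq'])
  · constructor
    · intro hflag
      show W'.length ≤ (pvEdgesB segs).countP
        (fun e => decide (e.1 ∈ W') && decide (e.2 ∈ W'))
      obtain ⟨e0, he0, ⟨h1, h2⟩, hne⟩ := hfin.hasflag (hproj.trans hflag)
      have hcf : par'.length + 1 ≤ (pvEdgesB segs).countP
          (fun e => decide (e.1 ∈ parVerts k par') && decide (e.2 ∈ parVerts k par')) :=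
        count_flag (nodup_pvEdgesB segs) hfin.chain he0 h1 h2 hne
      omega
    · intro hle
      have hle' : W'.length ≤ (pvEdgesB segs).countP
          (fun e => decide (e.1 ∈ W') && decide (e.2 ∈ W')) := hle
      by_contra hflag
      have hff : ffin = false := by
        cases hffc : ffin
        · rfl
        · exact absurd hffc hflag
      have hall := hfin.noflag (hproj.trans hff)
      have hcn : (pvEdgesB segs).countP
          (fun e => decide (e.1 ∈ parVerts k par') && decide (e.2 ∈ parVerts k par')) =
          par'.length :=
        count_noflag (nodup_pvEdgesB segs) hfin.chain hall
      omega

-- ---------- outer loop and final counting ----------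

def pvCyc (edges : List Eg) (C : List Pt) : Bool :=
  decide (C.length ≤ edges.countP (fun e => decide (e.1 ∈ C)))

def pvHit (edges : List Eg) (comps : List (List Pt)) (dk : List Pt) : Nat :=
  comps.countP (fun C => pvCyc edges C && C.any (fun x => decide (x ∈ dk)))

lemma outerA (segs : List (Int × Int × Int × Int)) :
    ∀ (rest done : List Pt) (visAcc : List Pt) (cnt : Int),
      (pvAdj segs).keys = done ++ rest →
      (∀ x, x ∈ visAcc ↔ ∃ k' ∈ done, ConnE (pvEdgesB segs) k' x) →
      cnt = (pvHit (pvEdgesB segs) ((pvEdgesB segs).foldl pvMergeStep []) done : Int) →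
      (rest.foldl (fun acc node =>
        if node ∈ acc.1 then acc
        else
          let res := pvLoopA (pvAdj segs) (pvFuelA (pvAdj segs)) acc.1 [(node, none)] false
          (res.1, if res.2 then acc.2 + 1 else acc.2)) (visAcc, cnt)).2 =
      (pvHit (pvEdgesB segs) ((pvEdgesB segs).foldl pvMergeStep []) (done ++ rest) : Int) := by
  intro rest
  induction rest with
  | nil =>
    intro done visAcc cnt hkeys hvism hcnt
    rw [List.foldl_nil, List.append_nil]
    exact hcnt
  | cons node rest' ih =>
    intro done visAcc cnt hkeys hvism hcnt
    rw [List.foldl_cons]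
    have hPart := partInv_full segs
    have hcompsNd := partInv_comps_nodup hPart
    have hkeyE : ∀ v, v ∈ (pvAdj segs).keys →
        ∃ e ∈ pvEdgesB segs, v = e.1 ∨ v = e.2 := by
      intro v hv
      obtain ⟨s', hs', hv'⟩ := (mem_keys_pvAdj segs v).mp hv
      refine ⟨pvNormEdge (pvPts s').1 (pvPts s').2, (mem_pvEdgesB segs _).mpr ⟨s', hs', rfl⟩, ?_⟩
      exact norm_endpoints.mpr hv'
    have hanyEq : ∀ C ∈ (pvEdgesB segs).foldl pvMergeStep [], node ∉ C →
        (C.any (fun x => decide (x ∈ done ++ [node]))) =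
        (C.any (fun x => decide (x ∈ done))) := by
      intro C _ hnC
      cases hA : C.any (fun x => decide (x ∈ done)) with
      | true =>
        obtain ⟨x, hx, hxd⟩ := List.any_eq_true.mp hA
        exact List.any_eq_true.mpr ⟨x, hx, by
          rw [decide_eq_true_eq] at hxd ⊢
          exact List.mem_append.mpr (Or.inl hxd)⟩
      | false =>
        cases h : C.any (fun x => decide (x ∈ done ++ [node])) with
        | false => rfl
        | true =>
          exfalso
          obtain ⟨x, hx, hxd⟩ := List.any_eq_true.mp h
          rw [decide_eq_true_eq] at hxd
          rcases List.mem_append.mp hxd with h0 | h0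
          · have : (C.any (fun x => decide (x ∈ done))) = true :=
              List.any_eq_true.mpr ⟨x, hx, by simp [h0]⟩
            rw [this] at hA
            exact Bool.noConfusion hA
          · rw [List.mem_singleton] at h0
            exact hnC (h0 ▸ hx)
    by_cases hnv : node ∈ visAcc
    · rw [if_pos hnv]
      have h1 : (pvAdj segs).keys = (done ++ [node]) ++ rest' := by
        rw [hkeys]; simp
      have h2 : ∀ x, x ∈ visAcc ↔
          ∃ k' ∈ done ++ [node], ConnE (pvEdgesB segs) k' x := by
        intro x
        rw [hvism x]
        constructor
        · rintro ⟨k', hk', hc⟩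
          exact ⟨k', List.mem_append.mpr (Or.inl hk'), hc⟩
        · rintro ⟨k', hk', hc⟩
          rcases List.mem_append.mp hk' with h0 | h0
          · exact ⟨k', h0, hc⟩
          · rw [List.mem_singleton] at h0
            subst h0
            obtain ⟨k'', hk'', hc''⟩ := (hvism k').mp hnv
            exact ⟨k'', hk'', connE_trans hc'' hc⟩
      have h3 : cnt = (pvHit (pvEdgesB segs) ((pvEdgesB segs).foldl pvMergeStep [])
          (done ++ [node]) : Int) := by
        rw [hcnt]
        congr 1
        apply countP_congr_mem
        intro C hC
        by_cases hnC : node ∈ C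
        · -- node's component already hit: some k' in done lies in C
          obtain ⟨k', hk', hc'⟩ := (hvism node).mp hnv
          have hk'C : k' ∈ C :=
            (partInv_class hPart hC hnC k').mpr (connE_symm hc')
          have hT : ∀ dk : List Pt, k' ∈ dk →
              (C.any (fun x => decide (x ∈ dk))) = true :=
            fun dk hdk => List.any_eq_true.mpr ⟨k', hk'C, by simp [hdk]⟩
          rw [hT done hk', hT (done ++ [node]) (List.mem_append.mpr (Or.inl hk'))]
        · rw [hanyEq C hC hnC]
      exact (ih (done ++ [node]) visAcc cnt h1 h2 h3).trans
        (by rw [List.append_assoc, List.singleton_append])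
    · rw [if_neg hnv]
      have hnodekeys : node ∈ (pvAdj segs).keys := by rw [hkeys]; simp
      have hV0 : ∀ v, ConnE (pvEdgesB segs) node v → v ∉ visAcc := by
        intro v hc hv
        obtain ⟨k', hk', hc'⟩ := (hvism v).mp hv
        exact hnv ((hvism node).mpr ⟨k', hk', connE_trans hc' (connE_symm hc)⟩)
      obtain ⟨W, flag, heq, hWnd, hWconn, hflag⟩ :=
        loop_component segs node visAcc hnodekeys hnv hV0
      rw [heq]
      -- the component containing node
      obtain ⟨C, hC, hnodeC⟩ : ∃ C ∈ (pvEdgesB segs).foldl pvMergeStep [], node ∈ C := by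
        obtain ⟨e, he, hv⟩ := hkeyE node hnodekeys
        exact (hPart.cover node).mpr ⟨e, he, hv⟩
      have hmemC : ∀ v, v ∈ C ↔ ConnE (pvEdgesB segs) node v :=
        partInv_class hPart hC hnodeC
      have hWC : ∀ v, v ∈ W ↔ v ∈ C := by
        intro v; rw [hWconn v, hmemC v]
      have hlen : W.length = C.length := by
        have : W.Perm C :=
          (List.perm_ext_iff_of_nodup hWnd (hPart.nodup C hC)).mpr hWC
        exact this.length_eq
      have hcnt1 : (pvEdgesB segs).countP (fun e => decide (e.1 ∈ C)) =
          (pvEdgesB segs).countP (fun e => decide (e.1 ∈ W) && decide (e.2 ∈ W)) := by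
        apply countP_congr_mem
        intro e he
        have h1 : decide (e.1 ∈ C) = decide (e.1 ∈ W) := by
          rw [decide_eq_decide]
          exact (hWC e.1).symm
        by_cases hC1 : e.1 ∈ C
        · have hC2 : e.2 ∈ C := hPart.closed C hC e.1 hC1 e.2 (relE_of_mem_pvEdgesB he)
          rw [h1]
          rw [show decide (e.1 ∈ W) = true by rw [decide_eq_true_eq]; exact (hWC e.1).mpr hC1]
          rw [show decide (e.2 ∈ W) = true by rw [decide_eq_true_eq]; exact (hWC e.2).mpr hC2]
          rfl
        · rw [h1]
          rw [show decide (e.1 ∈ W) = false by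
            rw [decide_eq_false_iff_not]; exact fun h => hC1 ((hWC e.1).mp h)]
          rfl
      have hcycval : pvCyc (pvEdgesB segs) C =
          decide (W.length ≤ (pvEdgesB segs).countP
            (fun e => decide (e.1 ∈ W) && decide (e.2 ∈ W))) := by
        rw [pvCyc, decide_eq_decide, hcnt1, hlen]
      have hCdone : (C.any (fun x => decide (x ∈ done))) = false := by
        cases h : C.any (fun x => decide (x ∈ done)) with
        | false => rfl
        | true =>
          exfalso
          obtain ⟨x, hx, hxd⟩ := List.any_eq_true.mp h
          rw [decide_eq_true_eq] at hxd
          have hxvis : x ∈ visAcc := (hvism x).mpr ⟨x, hxd, Relation.ReflTransGen.refl⟩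
          exact hV0 x ((hmemC x).mp hx) hxvis
      have hCdone' : (C.any (fun x => decide (x ∈ done ++ [node]))) = true :=
        List.any_eq_true.mpr ⟨node, hnodeC, by simp⟩
      have h1' : (pvAdj segs).keys = (done ++ [node]) ++ rest' := by rw [hkeys]; simp
      have h2' : ∀ x, x ∈ visAcc ++ W ↔
          ∃ k' ∈ done ++ [node], ConnE (pvEdgesB segs) k' x := by
        intro x
        constructor
        · intro hx
          rcases List.mem_append.mp hx with h0 | h0
          · obtain ⟨k', hk', hc⟩ := (hvism x).mp h0
            exact ⟨k', List.mem_append.mpr (Or.inl hk'), hc⟩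
          · exact ⟨node, List.mem_append.mpr (Or.inr (by simp)), (hWconn x).mp h0⟩
        · rintro ⟨k', hk', hc⟩
          rcases List.mem_append.mp hk' with h0 | h0
          · exact List.mem_append.mpr (Or.inl ((hvism x).mpr ⟨k', h0, hc⟩))
          · rw [List.mem_singleton] at h0
            subst h0
            exact List.mem_append.mpr (Or.inr ((hWconn x).mpr hc))
      have hsame : ∀ C' ∈ (pvEdgesB segs).foldl pvMergeStep [], C' ≠ C →
          (pvCyc (pvEdgesB segs) C' && C'.any (fun x => decide (x ∈ done))) =
          (pvCyc (pvEdgesB segs) C' && C'.any (fun x => decide (x ∈ done ++ [node]))) := by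
        intro C' hC' hne
        have hnC' : node ∉ C' := fun h =>
          (disj_of_mem hPart.disj hC hC' (fun he => hne he.symm) node hnodeC) h
        rw [hanyEq C' hC' hnC']
      cases flag with
      | true =>
        have hle := hflag.mp rfl
        have hcycC : pvCyc (pvEdgesB segs) C = true := by
          rw [hcycval, decide_eq_true_eq]; exact hle
        have hstep : pvHit (pvEdgesB segs) ((pvEdgesB segs).foldl pvMergeStep [])
            (done ++ [node]) =
            pvHit (pvEdgesB segs) ((pvEdgesB segs).foldl pvMergeStep []) done + 1 := by
          unfold pvHit
          apply countP_flip_one hcompsNd hC _ _ hsame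
          · rw [hCdone, Bool.and_false]
          · rw [hCdone', Bool.and_true]; exact hcycC
        exact (ih (done ++ [node]) (visAcc ++ W) (cnt + 1) h1' h2'
            (by rw [hstep, Nat.cast_add, Nat.cast_one, ← hcnt])).trans
          (by rw [List.append_assoc, List.singleton_append])
      | false =>
        have hnle : ¬(W.length ≤ (pvEdgesB segs).countP
            (fun e => decide (e.1 ∈ W) && decide (e.2 ∈ W))) :=
          fun h => absurd (hflag.mpr h) (by decide)
        have hcycC : pvCyc (pvEdgesB segs) C = false := by
          rw [hcycval, decide_eq_false_iff_not]; exact hnle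
        have hstep : pvHit (pvEdgesB segs) ((pvEdgesB segs).foldl pvMergeStep [])
            (done ++ [node]) =
            pvHit (pvEdgesB segs) ((pvEdgesB segs).foldl pvMergeStep []) done := by
          unfold pvHit
          apply countP_congr_mem
          intro C' hC'
          by_cases hne : C' = C
          · subst hne
            rw [hcycC, Bool.false_and, Bool.false_and]
          · exact (hsame C' hC' hne).symm
        exact (ih (done ++ [node]) (visAcc ++ W) cnt h1' h2'
            (by rw [hstep]; exact hcnt)).trans
          (by rw [List.append_assoc, List.singleton_append])

lemma final_hit (segs : List (Int × Int × Int × Int)) :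
    (pvHit (pvEdgesB segs) ((pvEdgesB segs).foldl pvMergeStep []) (pvAdj segs).keys : Int) =
      count_closed_shapes_alt segs := by
  have hPart := partInv_full segs
  have hall : ∀ C ∈ (pvEdgesB segs).foldl pvMergeStep [],
      (C.any (fun x => decide (x ∈ (pvAdj segs).keys))) = true := by
    intro C hC
    obtain ⟨x, hx⟩ := List.exists_mem_of_ne_nil C (hPart.nonempty C hC)
    obtain ⟨e, he, hv⟩ := (hPart.cover x).mp ⟨C, hC, hx⟩
    have hxk : x ∈ (pvAdj segs).keys := by
      rcases hv with h0 | h0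
      · exact h0 ▸ edge_fst_mem_keys he
      · exact h0 ▸ rel_mem_keys (relE_symm (relE_of_mem_pvEdgesB he))
    exact List.any_eq_true.mpr ⟨x, hx, by simp [hxk]⟩
  unfold pvHit
  rw [countP_congr_mem _ _ (fun C => pvCyc (pvEdgesB segs) C)
    (fun C hC => by rw [hall C hC, Bool.and_true])]
  show (((((pvEdgesB segs).foldl pvMergeStep []).countP
      (fun C => pvCyc (pvEdgesB segs) C)) : Nat) : Int) =
    ((((pvEdgesB segs).foldl pvMergeStep []).filter
      (fun c => (pvEdgesB segs).countP (fun e => decide (e.1 ∈ c)) ≥ c.length)).length : Int)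
  congr 1
  rw [← List.countP_eq_length_filter]
  apply countP_congr_mem
  intro C _
  rw [pvCyc]

-- ===== VERDICT (by name: the statement is the Claim_ definition above) =====
theorem count_closed_shapes_spec : Claim_equal_count_closed_shapes := by
  intro segments _
  unfold Spec_count_closed_shapes
  have h0 := outerA segments (pvAdj segments).keys [] [] 0 (by simp) (by simp) ?hbase
  case hbase =>
    unfold pvHit
    rw [show (((pvEdgesB segments).foldl pvMergeStep []).countP
        (fun C => pvCyc (pvEdgesB segments) C &&
          C.any (fun x => decide (x ∈ ([] : List Pt))))) = 0 from ?_]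
    · simp
    · rw [List.countP_eq_zero]
      intro C _
      simp
  rw [List.nil_append] at h0
  exact h0.trans (final_hit segments)
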